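-- pv_equiv track=rewrite | github.com/mattscraper/PlateMate | backend/openai_handler.py | _get_realistic_calorie_distribution
-- ===== SOURCE A (Python) =====
-- def _get_realistic_calorie_distribution(total_calories, meals_per_day):
--     """Calculate realistic calorie distribution for different meals"""
--     if meals_per_day == 1:
--         return [total_calories]
--     elif meals_per_day == 2:
--         # Lunch/Dinner split
--         lunch = int(total_calories * 0.45)
--         dinner = total_calories - lunch
--         return [lunch, dinner]
--     elif meals_per_day == 3:
--         # Breakfast, Lunch, Dinner
--         breakfast = int(total_calories * 0.25)  # 25%
--         lunch = int(total_calories * 0.35)      # 35%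
--         dinner = total_calories - breakfast - lunch  # 40%
--         return [breakfast, lunch, dinner]
--     elif meals_per_day == 4:
--         # Breakfast, Lunch, Dinner, Snack
--         breakfast = int(total_calories * 0.25)  # 25%
--         lunch = int(total_calories * 0.30)      # 30%
--         dinner = int(total_calories * 0.35)     # 35%
--         snack = total_calories - breakfast - lunch - dinner  # 10%
--         return [breakfast, lunch, dinner, snack]
--     else:
--         # Default to equal distribution for more than 4 meals
--         base_calories = total_calories // meals_per_day
--         remainder = total_calories % meals_per_day
--         calories = [base_calories] * meals_per_day
--         # Distribute remainder
--         for i in range(remainder):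
--             calories[i] += 1
--         return calories
-- ===== SOURCE B (Python) =====
-- # Single pass carrying the remaining-calorie budget: fixed-ratio meals consume
-- # int(total*r) from the budget one by one (the last meal takes what is left);
-- # the fallback gives each successive meal ceil(remaining/meals_left), which
-- # self-balances instead of A's base list plus remainder-patch loop.
-- _RATIOS = {1: [], 2: [0.45], 3: [0.25, 0.35], 4: [0.25, 0.30, 0.35]}
--
-- def _get_realistic_calorie_distribution(total_calories, meals_per_day):
--     ratios = _RATIOS.get(meals_per_day)
--     remaining = total_calories
--     out = []
--     if ratios is None:
--         meals = meals_per_day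
--         while meals > 0:
--             share = -((-remaining) // meals)  # ceil division
--             out.append(share)
--             remaining -= share
--             meals -= 1
--         return out
--     for r in ratios:
--         part = int(total_calories * r)
--         out.append(part)
--         remaining -= part
--     out.append(remaining)
--     return out
-- ===== Notes on version B (the rewrite author's own statement) =====
-- stated objective: alternative
-- what changed: Replaces A's branch-per-count construction (independent parts then subtractions, and a base list patched by a remainder loop) with a single pass that carries the remaining-calorie budget: ratio meals subtract int(total*r) from the budget one by one (the last meal takes what is left), and the >4-meal fallback self-balances by giving each successive meal ceil(remaining/meals_left) instead of base+remainder patching.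
import Mathlib
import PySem

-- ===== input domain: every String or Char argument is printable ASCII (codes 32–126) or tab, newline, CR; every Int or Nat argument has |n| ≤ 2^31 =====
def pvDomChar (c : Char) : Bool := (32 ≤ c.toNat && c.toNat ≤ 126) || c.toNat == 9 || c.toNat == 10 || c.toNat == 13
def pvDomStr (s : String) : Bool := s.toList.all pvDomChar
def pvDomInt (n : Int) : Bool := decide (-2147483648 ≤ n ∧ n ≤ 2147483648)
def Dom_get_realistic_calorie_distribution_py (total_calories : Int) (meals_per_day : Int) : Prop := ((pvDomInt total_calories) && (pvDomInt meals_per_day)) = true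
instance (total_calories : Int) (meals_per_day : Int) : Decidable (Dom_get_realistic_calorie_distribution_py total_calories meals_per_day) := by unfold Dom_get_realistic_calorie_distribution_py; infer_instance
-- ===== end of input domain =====

-- B replaces A's branch-per-count construction (parts then subtractions; base list
-- patched by a remainder loop) with one pass carrying the remaining-calorie budget,
-- whose fallback self-balances by giving each meal ceil(remaining/meals_left)
-- (objective: alternative).

-- ===== PORT A =====
-- Hand model of Python's `int(t * c)` for a float literal c whose exact IEEE-754
-- value is m / 2^k: the product t*c is a double (round to nearest, ties to even —
-- exact here since |t| ≤ 2^31 admits no overflow/subnormal) truncated toward zero.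
-- Used by BOTH ports: both Pythons execute this same primitive on the same literals.
def pyTruncMulFloat (t : Int) (m : Nat) (k : Nat) : Int :=
  let s : Nat := t.natAbs * m
  if s = 0 then 0 else
  let b := Nat.log2 s + 1          -- bit length of s (s > 0)
  let shift := b - 53              -- 0 if the product already fits in 53 bits
  let q := s / 2 ^ shift
  let r := s % 2 ^ shift
  let half := 2 ^ shift / 2
  let q' := if shift ≠ 0 ∧ (r > half ∨ (r = half ∧ q % 2 = 1)) then q + 1 else q
  let res : Nat := q' / 2 ^ (k - shift)   -- trunc toward 0 of the rounded |product|
  if 0 ≤ t then (res : Int) else -(res : Int)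

-- float literals as (numerator m, exponent k) with exact value m / 2^k:
-- 0.45 = (8106479329266893, 54), 0.25 = (1, 2), 0.35 = (3152519739159347, 53), 0.30 = (5404319552844595, 54)
def get_realistic_calorie_distribution_py (total_calories : Int) (meals_per_day : Int) : List Int :=
  if meals_per_day = 1 then
    [total_calories]
  else if meals_per_day = 2 then
    let lunch := pyTruncMulFloat total_calories 8106479329266893 54
    let dinner := total_calories - lunch
    [lunch, dinner]
  else if meals_per_day = 3 then
    let breakfast := pyTruncMulFloat total_calories 1 2
    let lunch := pyTruncMulFloat total_calories 3152519739159347 53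
    let dinner := total_calories - breakfast - lunch
    [breakfast, lunch, dinner]
  else if meals_per_day = 4 then
    let breakfast := pyTruncMulFloat total_calories 1 2
    let lunch := pyTruncMulFloat total_calories 5404319552844595 54
    let dinner := pyTruncMulFloat total_calories 3152519739159347 53
    let snack := total_calories - breakfast - lunch - dinner
    [breakfast, lunch, dinner, snack]
  else
    let base_calories := PySem.Int.floordiv total_calories meals_per_day
    let remainder := PySem.Int.mod total_calories meals_per_day
    let calories := List.replicate meals_per_day.toNat base_calories
    -- calories[i] += 1: every visited i satisfies 0 ≤ i < remainder ≤ len(calories),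
    -- so List.modify is exact on those indices.
    (PySem.List.pyRange 0 remainder 1).foldl
      (fun cal i => cal.modify i.toNat (· + 1)) calories

-- ===== PORT B =====
-- Source B's module-level _RATIOS dict literal; each float ratio is carried as its
-- exact (numerator, exponent) pair, exactly as pyTruncMulFloat consumes it.
def pvRatios : PySem.Dict Int (List (Nat × Nat)) :=
  PySem.Dict.mk
    [(1, []), (2, [(8106479329266893, 54)]),
     (3, [(1, 2), (3152519739159347, 53)]),
     (4, [(1, 2), (5404319552844595, 54), (3152519739159347, 53)])]

-- Source B's `while meals > 0` loop, counting the meals left down to 0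
-- (n+1 = current value of `meals`; the loop runs meals.toNat times):
-- share = -((-remaining) // meals), push, continue with remaining - share.
def pvEvenGo (remaining : Int) : Nat → List Int
  | 0 => []
  | n+1 =>
    let share := -(PySem.Int.floordiv (-remaining) ((n : Int) + 1))
    share :: pvEvenGo (remaining - share) n

def get_realistic_calorie_distribution_py_alt (total_calories : Int) (meals_per_day : Int) : List Int :=
  match pvRatios.get? meals_per_day with
  | none => pvEvenGo total_calories meals_per_day.toNat
  | some ratios =>
      -- the `for r in ratios` loop with state (out, remaining)
      let st := ratios.foldl
        (fun (s : List Int × Int) (p : Nat × Nat) =>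
          let part := pyTruncMulFloat total_calories p.1 p.2
          (s.1 ++ [part], s.2 - part))
        (([] : List Int), total_calories)
      st.1 ++ [st.2]

-- ===== PRECONDITION & SPEC =====
-- A raises ZeroDivisionError when meals_per_day = 0 (total // 0); excluded here.
def Pre_get_realistic_calorie_distribution_py (total_calories : Int) (meals_per_day : Int) : Prop := meals_per_day ≠ 0
instance (total_calories : Int) (meals_per_day : Int) : Decidable (Pre_get_realistic_calorie_distribution_py total_calories meals_per_day) := by unfold Pre_get_realistic_calorie_distribution_py; infer_instance
def pvWitness_get_realistic_calorie_distribution_py : Int × Int := (2000, 3)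

def Spec_get_realistic_calorie_distribution_py (total_calories : Int) (meals_per_day : Int) (out : List Int) : Prop := out = get_realistic_calorie_distribution_py_alt total_calories meals_per_day
instance (total_calories : Int) (meals_per_day : Int) (out : List Int) : Decidable (Spec_get_realistic_calorie_distribution_py total_calories meals_per_day out) := by unfold Spec_get_realistic_calorie_distribution_py; infer_instance

-- ===== CLAIM (what is proved, stated in full; the proofs are below) =====
def Claim_equal_get_realistic_calorie_distribution_py : Prop := ∀ (total_calories : Int) (meals_per_day : Int), Dom_get_realistic_calorie_distribution_py total_calories meals_per_day → Pre_get_realistic_calorie_distribution_py total_calories meals_per_day → Spec_get_realistic_calorie_distribution_py total_calories meals_per_day (get_realistic_calorie_distribution_py total_calories meals_per_day)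

-- ===== LEMMAS AND PROOFS =====

lemma ediv_small0 (x m : Int) (h0 : 0 ≤ x) (h1 : x < m) : x / m = 0 :=
  Int.ediv_eq_zero_of_lt h0 h1

-- Source B's per-step share -((-t)//M) is floor division plus a spill bit
lemma ceil_share (t M : Int) (hM : 0 < M) :
    -((-t) / M) = t / M + if 0 < t % M then 1 else 0 := by
  have ht : M * (t / M) + t % M = t := Int.mul_ediv_add_emod t M
  have hr0 : 0 ≤ t % M := Int.emod_nonneg t (by omega)
  have hrm : t % M < M := Int.emod_lt_of_pos t hM
  by_cases hr : t % M = 0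
  · have h1 : -t = M * (-(t / M)) := by rw [mul_neg]; linarith [ht]
    rw [h1, Int.mul_ediv_cancel_left _ (by omega : M ≠ 0)]
    simp [hr]
  · have e : (-(t / M) - 1) * M = -(M * (t / M)) - M := by ring
    have h1 : -t = (M - t % M) + (-(t / M) - 1) * M := by rw [e]; linarith [ht]
    rw [h1, Int.add_mul_ediv_right _ _ (by omega : M ≠ 0),
        ediv_small0 _ _ (by omega) (by omega)]
    simp only [if_pos (lt_of_le_of_ne hr0 (Ne.symm hr))]
    omega

-- B's self-balancing loop equals the floor+spill closed form
lemma pvEvenGo_eq (n : Nat) : ∀ t : Int,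
    pvEvenGo t n
    = (List.range n).map (fun i : Nat => t / (n : Int) + if (i : Int) < t % (n : Int) then 1 else 0) := by
  induction n with
  | zero => intro t; rfl
  | succ n ih =>
    intro t
    have hM : (0:Int) < (n : Int) + 1 := by positivity
    set M : Int := (n : Int) + 1 with hMdef
    have hfd : PySem.Int.floordiv (-t) M = (-t) / M := PySem.Int.floordiv_eq_ediv_of_pos hM
    have hshare : -(PySem.Int.floordiv (-t) M) = t / M + if 0 < t % M then 1 else 0 := by
      rw [hfd]; exact ceil_share t M hM
    have ht : M * (t / M) + t % M = t := Int.mul_ediv_add_emod t M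
    have hr0 : 0 ≤ t % M := Int.emod_nonneg t (by omega)
    have hrm : t % M < M := Int.emod_lt_of_pos t hM
    have hMc : ((n+1 : Nat) : Int) = M := by push_cast; rw [hMdef]
    show (-(PySem.Int.floordiv (-t) M))
        :: pvEvenGo (t - -(PySem.Int.floordiv (-t) M)) n
      = (List.range (n+1)).map
          (fun i : Nat => t / ((n+1 : Nat) : Int) + if (i : Int) < t % ((n+1 : Nat) : Int) then 1 else 0)
    rw [List.range_succ_eq_map, List.map_cons, List.map_map, hMc]
    refine List.cons_eq_cons.mpr ⟨by simpa using hshare, ?_⟩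
    set t' : Int := t - -(PySem.Int.floordiv (-t) M) with ht'def
    rcases Nat.eq_zero_or_pos n with hn | hn
    · subst hn; simp [pvEvenGo]
    · have hn' : (0:Int) < (n : Int) := by exact_mod_cast hn
      have hmul : M * (t / M) = (t / M) * (n : Int) + (t / M) := by rw [hMdef]; ring
      -- compute the new budget's floor and remainder over n
      have hkey : ∃ r' : Int, t' = r' + (t / M) * (n : Int) ∧ 0 ≤ r' ∧ r' < (n : Int) ∧
          (∀ i : Nat, ((i : Int) < r' ↔ ((i : Int)) + 1 < t % M)) := by
        by_cases hr : 0 < t % M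
        · refine ⟨t % M - 1, ?_, by omega, by omega, fun i => by omega⟩
          rw [ht'def, hshare, if_pos hr]; linarith [ht, hmul]
        · refine ⟨0, ?_, le_refl 0, hn', fun i => by omega⟩
          rw [ht'def, hshare, if_neg hr]
          have hr2 : t % M = 0 := by omega
          linarith [ht, hmul]
      obtain ⟨r', heq, hr'0, hr'n, hiff⟩ := hkey
      have hdiv : t' / (n : Int) = t / M := by
        rw [heq, Int.add_mul_ediv_right _ _ (by omega : (n:Int) ≠ 0),
            ediv_small0 _ _ hr'0 hr'n]; omega
      have hmod : t' % (n : Int) = r' := by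
        rw [heq, mul_comm, Int.add_mul_emod_self_left]; exact Int.emod_eq_of_lt hr'0 hr'n
      rw [ih t', hdiv, hmod]
      apply List.map_congr_left
      intro i _
      have := hiff i
      simp only [Function.comp]
      split_ifs with c1 c2 <;> first | rfl | omega

-- A's remainder loop on a replicated list, in closed form
lemma foldl_modify_replicate (base : Int) (r n : Nat) (h : r ≤ n) :
    (List.range r).foldl (fun cal i => cal.modify i (· + 1)) (List.replicate n base)
    = (List.range n).map (fun i => base + if i < r then 1 else 0) := by
  induction r with
  | zero => simp
  | succ r ih =>
    rw [List.range_succ, List.foldl_append, ih (by omega)]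
    simp only [List.foldl_cons, List.foldl_nil]
    apply List.ext_getElem
    · simp
    · intro i h1 h2
      simp only [List.length_map, List.length_range] at h2
      rw [List.getElem_modify]
      simp only [List.getElem_map, List.getElem_range]
      split_ifs <;> omega

lemma mod_nonpos_of_neg (t m : Int) (h : m < 0) : PySem.Int.mod t m ≤ 0 := by
  have h1 : PySem.Int.mod t m = - PySem.Int.mod (-t) (-m) := by
    rw [← PySem.Int.mod_neg_neg (-t) (-m)]; simp
  rw [h1, PySem.Int.mod_eq_emod_of_pos (by omega)]
  have := Int.emod_nonneg (-t) (show (-m) ≠ 0 by omega)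
  omega

lemma ratios_none (m : Int) (h1 : m ≠ 1) (h2 : m ≠ 2) (h3 : m ≠ 3) (h4 : m ≠ 4) :
    pvRatios.get? m = none := by
  simp [pvRatios, PySem.Dict.get?, beq_iff_eq, show (1:Int) ≠ m by omega,
    show (2:Int) ≠ m by omega, show (3:Int) ≠ m by omega, show (4:Int) ≠ m by omega]

theorem get_realistic_calorie_distribution_py_spec : Claim_equal_get_realistic_calorie_distribution_py := by
  unfold Claim_equal_get_realistic_calorie_distribution_py
  intro t m _ hm
  unfold Spec_get_realistic_calorie_distribution_py
  by_cases h1 : m = 1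
  · subst h1
    show _ = get_realistic_calorie_distribution_py_alt t 1
    have hB : get_realistic_calorie_distribution_py_alt t 1 = [] ++ [t] := rfl
    rw [hB]; rfl
  by_cases h2 : m = 2
  · subst h2
    have key : ∀ x : Int,
        ([x, t - x] : List Int) = ([] ++ [x]) ++ [t - x] := by intro x; simp
    exact key _
  by_cases h3 : m = 3
  · subst h3
    have key : ∀ x y : Int,
        ([x, y, t - x - y] : List Int) = (([] ++ [x]) ++ [y]) ++ [t - x - y] := by
      intro x y; simp
    exact key _ _
  by_cases h4 : m = 4
  · subst h4
    have key : ∀ x y z : Int,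
        ([x, y, z, t - x - y - z] : List Int)
          = ((([] ++ [x]) ++ [y]) ++ [z]) ++ [t - x - y - z] := by
      intro x y z; simp
    exact key _ _ _
  -- fallback: meals_per_day ∉ {1,2,3,4}
  simp only [get_realistic_calorie_distribution_py, get_realistic_calorie_distribution_py_alt,
    if_neg h1, if_neg h2, if_neg h3, if_neg h4, ratios_none m h1 h2 h3 h4]
  rcases lt_or_gt_of_ne hm with hneg | hpos
  · -- m < 0: A's [x]*m and range are empty; B's while-loop guard fails at once
    rw [PySem.List.pyRange_one_eq_nil (mod_nonpos_of_neg t m hneg),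
        Int.toNat_of_nonpos (le_of_lt hneg)]
    rfl
  · have hr0 : 0 ≤ PySem.Int.mod t m := by
      rw [PySem.Int.mod_eq_emod_of_pos hpos]; exact Int.emod_nonneg t (by omega)
    have hrm : PySem.Int.mod t m < m := by
      rw [PySem.Int.mod_eq_emod_of_pos hpos]; exact Int.emod_lt_of_pos t hpos
    set r := PySem.Int.mod t m with hrdef
    have hrn : r = ((r.toNat : Nat) : Int) := by omega
    have hmn : m = ((m.toNat : Nat) : Int) := by omega
    rw [hrn, hmn, PySem.List.pyRange_zero_nat, List.foldl_map]
    simp only [Int.toNat_natCast]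
    rw [foldl_modify_replicate _ _ _ (by omega), pvEvenGo_eq m.toNat t]
    apply List.map_congr_left
    intro i hi
    rw [← hmn]
    have hfd : PySem.Int.floordiv t m = t / m := PySem.Int.floordiv_eq_ediv_of_pos hpos
    have hmod : PySem.Int.mod t m = t % m := PySem.Int.mod_eq_emod_of_pos hpos
    rw [hfd]
    congr 1
    rw [hrdef, hmod] at hrn ⊢
    split_ifs with c1 c2 <;> first | rfl | omega
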